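-- pv_equiv track=rewrite | github.com/ShunaMae/CompetitiveProgramming | Daily_Practice/2023_11/2023_11_03/Algo_prime3_q5.py | calc_divisors
-- ===== SOURCE A (Python) =====
-- def calc_divisors(N, b):
--     res = []
--
--     for i in range(1, N+1):
--         if i * i > N:
--             break
--
--         if N % i != 0:
--             continue
--
--         if i > b:
--             res.append(i)
--
--         if N // i != i and N // i > b:
--             res.append(N // i)
--
--     res.sort()
--
--     return res
-- ===== SOURCE B (Python) =====
-- def calc_divisors(N, b):
--     # build all divisors of N from its prime factorization, then filter and sort
--     if N < 1:
--         return []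
--     m = N
--     p = 2
--     divs = [1]
--     while p * p <= m:
--         e = 0
--         while m % p == 0:
--             m //= p
--             e += 1
--         if e:
--             divs = [d * p ** k for d in divs for k in range(e + 1)]
--         p += 1
--     if m > 1:
--         divs = [d * m ** k for d in divs for k in range(2)]
--     return sorted(d for d in divs if d > b)
-- ===== Notes on version B (the rewrite author's own statement) =====
-- stated objective: alternative
-- what changed: A does trial division up to sqrt(N) collecting each divisor pair (i, N//i) and sorts; B never enumerates divisor pairs: it factorizes N into prime powers by trial division and generates every divisor as a product of prime powers (a nested comprehension per prime), then filters > b and sorts.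
import Mathlib
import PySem

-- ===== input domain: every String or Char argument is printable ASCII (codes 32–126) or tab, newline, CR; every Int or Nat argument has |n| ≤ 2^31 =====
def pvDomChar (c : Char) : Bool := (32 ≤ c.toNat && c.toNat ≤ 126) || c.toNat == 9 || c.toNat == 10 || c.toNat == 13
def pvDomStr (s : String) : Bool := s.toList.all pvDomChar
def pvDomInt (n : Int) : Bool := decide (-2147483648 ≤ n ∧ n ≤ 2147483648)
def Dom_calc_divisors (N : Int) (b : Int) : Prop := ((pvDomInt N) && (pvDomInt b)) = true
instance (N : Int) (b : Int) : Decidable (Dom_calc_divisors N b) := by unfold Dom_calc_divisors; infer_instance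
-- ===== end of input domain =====

-- A trial-divides up to sqrt(N) collecting divisor pairs (i, N//i) and sorts; B instead
-- factorizes N into prime powers and generates every divisor as a product of prime powers.

-- ===== PORT A =====
-- the for-loop of A with its break/continue: recursion over the remaining range, accumulator res
def calcDivLoopA (N b : Int) : List Int → List Int → List Int
  | [], res => res
  | i :: rest, res =>
    if i * i > N then res                              -- break
    else if ¬ (PySem.Int.mod N i = 0) then calcDivLoopA N b rest res   -- continue
    else
      let res1 := if i > b then res ++ [i] else res
      let res2 := if PySem.Int.floordiv N i ≠ i ∧ PySem.Int.floordiv N i > b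
                  then res1 ++ [PySem.Int.floordiv N i] else res1
      calcDivLoopA N b rest res2

def calc_divisors (N : Int) (b : Int) : List Int :=
  PySem.List.sorted (calcDivLoopA N b (PySem.List.pyRange 1 (N + 1)) []) (fun x => x)

-- ===== PORT B =====
-- inner while: strip factors p out of m, counting them in e.
-- fuel (enough since m shrinks) and the extra '2 ≤ p ∧ 1 ≤ m' in the guard only make the
-- recursion total; they hold at every call the algorithm makes
def stripP (fuel : Nat) (m p e : Int) : Int × Int :=
  match fuel with
  | 0 => (m, e)
  | fuel + 1 =>
    if PySem.Int.mod m p = 0 ∧ 2 ≤ p ∧ 1 ≤ m then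
      stripP fuel (PySem.Int.floordiv m p) p (e + 1)
    else (m, e)

-- the comprehension [d * p ** k for d in divs for k in range(e + 1)]
-- (k ranges over 0..e, so 'p ** k' is exactly 'p ^ k.toNat')
def extDivs (divs : List Int) (p e : Int) : List Int :=
  divs.flatMap (fun d => (PySem.List.pyRange 0 (e + 1)).map (fun k => d * p ^ k.toNat))

-- outer while: trial division by p = 2, 3, … while p*p ≤ m (same totality-only fuel and guard)
def factLoop (fuel : Nat) (m p : Int) (divs : List Int) : Int × List Int :=
  match fuel with
  | 0 => (m, divs)
  | fuel + 1 =>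
    if p * p ≤ m ∧ 2 ≤ p ∧ 1 ≤ m then
      let s := stripP m.toNat m p 0
      let divs' := if s.2 ≠ 0 then extDivs divs p s.2 else divs
      factLoop fuel s.1 (p + 1) divs'
    else (m, divs)

def calc_divisors_alt (N : Int) (b : Int) : List Int :=
  if N < 1 then []
  else
    let r := factLoop (N + 1).toNat N 2 [1]
    let divs := if 1 < r.1 then extDivs r.2 r.1 1 else r.2
    PySem.List.sorted (divs.filter (fun d => decide (d > b))) (fun x => x)

-- ===== PRECONDITION & SPEC =====
def Spec_calc_divisors (N : Int) (b : Int) (out : List Int) : Prop := out = calc_divisors_alt N b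
instance (N : Int) (b : Int) (out : List Int) : Decidable (Spec_calc_divisors N b out) := by unfold Spec_calc_divisors; infer_instance

-- ===== CLAIM (what is proved, stated in full; the proofs are below) =====
def Claim_equal_calc_divisors : Prop := ∀ (N : Int) (b : Int), Dom_calc_divisors N b → Spec_calc_divisors N b (calc_divisors N b)

-- ===== LEMMAS AND PROOFS =====

-- the canonical answer both programs compute: divisors of N in 1..N greater than b, ascending
def canonDivs (N b : Int) : List Int :=
  (PySem.List.pyRange 1 (N + 1)).filter (fun i => decide (PySem.Int.mod N i = 0 ∧ i > b))

theorem pairwise_canonDivs (N b : Int) : (canonDivs N b).Pairwise (· < ·) :=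
  (PySem.List.pairwise_lt_pyRange_one 1 (N + 1)).filter _

theorem mem_canonDivs (N b x : Int) :
    x ∈ canonDivs N b ↔ 1 ≤ x ∧ x ≤ N ∧ PySem.Int.mod N x = 0 ∧ x > b := by
  simp only [canonDivs, List.mem_filter, PySem.List.mem_pyRange_one, decide_eq_true_eq]
  omega

-- ---------- A's side: sorted(collected pairs) = canonDivs ----------

-- what one iteration of A's loop appends
def contribA (N b i : Int) : List Int :=
  if PySem.Int.mod N i = 0 then
    (if i > b then [i] else []) ++
    (if PySem.Int.floordiv N i ≠ i ∧ PySem.Int.floordiv N i > b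
     then [PySem.Int.floordiv N i] else [])
  else []

-- the small-divisor and cofactor halves of contribA
def sPartA (N b i : Int) : List Int :=
  if PySem.Int.mod N i = 0 ∧ i > b then [i] else []
def bPartA (N b i : Int) : List Int :=
  if PySem.Int.mod N i = 0 ∧ PySem.Int.floordiv N i ≠ i ∧ PySem.Int.floordiv N i > b
  then [PySem.Int.floordiv N i] else []

theorem contribA_eq (N b i : Int) : contribA N b i = sPartA N b i ++ bPartA N b i := by
  unfold contribA sPartA bPartA
  by_cases hm : PySem.Int.mod N i = 0 <;>
    by_cases h1 : i > b <;>
    by_cases h2 : PySem.Int.floordiv N i ≠ i ∧ PySem.Int.floordiv N i > b <;>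
    simp [hm, h1, h2]

theorem calcDivLoopA_eq (N b : Int) :
    ∀ (l : List Int) (res : List Int),
      calcDivLoopA N b l res
        = res ++ (l.takeWhile (fun i => decide (i * i ≤ N))).flatMap (contribA N b) := by
  intro l
  induction l with
  | nil => intro res; simp [calcDivLoopA]
  | cons i rest ih =>
    intro res
    by_cases hbk : i * i > N
    · have hq : ¬ (i * i ≤ N) := by omega
      rw [List.takeWhile_cons, if_neg (by simp [hq])]
      simp [calcDivLoopA, hbk]
    · have hq : i * i ≤ N := by omega
      rw [List.takeWhile_cons, if_pos (by simp [hq])]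
      by_cases hm : PySem.Int.mod N i = 0
      · by_cases h1 : i > b <;>
          by_cases h2 : PySem.Int.floordiv N i ≠ i ∧ PySem.Int.floordiv N i > b <;>
          · simp only [calcDivLoopA]
            rw [if_neg hbk, if_neg (by simp [hm])]
            simp only [if_pos, if_neg, h1, h2, not_false_iff]
            rw [ih]
            simp [contribA, hm, h1, h2]
      · simp only [calcDivLoopA]
        rw [if_neg hbk, if_pos (by simp [hm]), ih]
        simp [contribA, hm]

-- flatMap of a pointwise append splits, up to permutation
theorem flatMap_append_perm {α β : Type} (l : List α) (f g : α → List β) :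
    (l.flatMap (fun x => f x ++ g x)).Perm (l.flatMap f ++ l.flatMap g) := by
  induction l with
  | nil => simp
  | cons a t ih =>
    simp only [List.flatMap_cons]
    have step1 : ((f a ++ g a) ++ t.flatMap (fun x => f x ++ g x)).Perm
        ((f a ++ g a) ++ (t.flatMap f ++ t.flatMap g)) := List.Perm.append_left _ ih
    have step2 : ((f a ++ g a) ++ (t.flatMap f ++ t.flatMap g)).Perm
        ((f a ++ t.flatMap f) ++ (g a ++ t.flatMap g)) := by
      have h2 : (g a ++ (t.flatMap f ++ t.flatMap g)).Perm
          (t.flatMap f ++ (g a ++ t.flatMap g)) := List.perm_append_comm_assoc _ _ _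
      have h3 := List.Perm.append_left (f a) h2
      simpa [List.append_assoc] using h3
    exact step1.trans step2

theorem flatMap_sPartA (N b : Int) (l : List Int) :
    l.flatMap (sPartA N b) = l.filter (fun x => decide (PySem.Int.mod N x = 0 ∧ x > b)) := by
  induction l with
  | nil => rfl
  | cons a t ih =>
    by_cases h : PySem.Int.mod N a = 0 ∧ a > b <;> simp [sPartA, h, ih]

theorem flatMap_bPartA (N b : Int) (l : List Int) :
    l.flatMap (bPartA N b)
      = (l.filter (fun x => decide (PySem.Int.mod N x = 0 ∧
          PySem.Int.floordiv N x ≠ x ∧ PySem.Int.floordiv N x > b))).map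
        (fun x => PySem.Int.floordiv N x) := by
  induction l with
  | nil => rfl
  | cons a t ih =>
    by_cases h : PySem.Int.mod N a = 0 ∧ PySem.Int.floordiv N a ≠ a ∧ PySem.Int.floordiv N a > b <;>
      simp [bPartA, h, ih]

-- the ascending prefix A's loop runs over
def prefixT (N : Int) : List Int :=
  (PySem.List.pyRange 1 (N + 1)).takeWhile (fun i => decide (i * i ≤ N))

theorem pairwise_prefixT (N : Int) : (prefixT N).Pairwise (· < ·) :=
  (PySem.List.pairwise_lt_pyRange_one 1 (N + 1)).sublist (List.takeWhile_sublist _)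

theorem mem_prefixT_bounds {N x : Int} (hx : x ∈ prefixT N) : 1 ≤ x ∧ x * x ≤ N := by
  have h1 := (PySem.List.mem_pyRange_one.1 ((List.takeWhile_sublist _).mem hx)).1
  have h2 := List.mem_takeWhile_imp hx
  simp only [decide_eq_true_eq] at h2
  exact ⟨h1, h2⟩

-- converse: every x with 1 ≤ x and x*x ≤ N lies in the takeWhile prefix
theorem mem_prefixT_of (N : Int) :
    ∀ (n : Nat) (a x : Int), (x - a).toNat ≤ n → 1 ≤ a → a ≤ x → x * x ≤ N →
      x ∈ (PySem.List.pyRange a (N + 1)).takeWhile (fun i => decide (i * i ≤ N)) := by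
  intro n
  induction n with
  | zero =>
    intro a x hn ha hax hxx
    have hax' : x = a := by omega
    subst hax'
    have hxN : x ≤ N := by nlinarith
    rw [PySem.List.pyRange_one_cons (by omega : x < N + 1), List.takeWhile_cons,
      if_pos (by simp [hxx])]
    exact List.mem_cons_self
  | succ n ih =>
    intro a x hn ha hax hxx
    by_cases hax' : a = x
    · subst hax'
      have hxN : a ≤ N := by nlinarith
      rw [PySem.List.pyRange_one_cons (by omega : a < N + 1), List.takeWhile_cons,
        if_pos (by simp [hxx])]
      exact List.mem_cons_self
    · have haa : a * a ≤ N := by nlinarith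
      have haN : a ≤ N := by nlinarith
      rw [PySem.List.pyRange_one_cons (by omega : a < N + 1), List.takeWhile_cons,
        if_pos (by simp [haa])]
      exact List.mem_cons_of_mem _ (ih (a + 1) x (by omega) (by omega) (by omega) hxx)

theorem mem_prefixT (N x : Int) : x ∈ prefixT N ↔ 1 ≤ x ∧ x * x ≤ N := by
  constructor
  · exact mem_prefixT_bounds
  · rintro ⟨h1, h2⟩
    exact mem_prefixT_of N (x - 1).toNat 1 x (by omega) (le_refl 1) h1 h2

-- arithmetic helper: i > 0 divides N, then floordiv N i is the cofactor
theorem floordiv_cofactor {N i q : Int} (hi : 0 < i) (h : N = i * q) :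
    PySem.Int.floordiv N i = q := by
  rw [PySem.Int.floordiv_eq_ediv_of_pos hi, h, Int.mul_ediv_cancel_left q (by omega)]

-- for i in the prefix that divides N: the cofactor is positive and N = i * cofactor
theorem cofactor_facts {N i : Int} (hi : i ∈ prefixT N) (hm : PySem.Int.mod N i = 0) :
    N = i * PySem.Int.floordiv N i ∧ 1 ≤ PySem.Int.floordiv N i := by
  obtain ⟨h1, h2⟩ := mem_prefixT_bounds hi
  obtain ⟨q, hq⟩ := (PySem.Int.mod_eq_zero_iff_dvd N i).1 hm
  have hf : PySem.Int.floordiv N i = q := floordiv_cofactor (by omega) hq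
  rw [hf]
  exact ⟨hq, by nlinarith⟩

-- the two halves A collects, as named lists
def smallL (N b : Int) : List Int :=
  (prefixT N).filter (fun x => decide (PySem.Int.mod N x = 0 ∧ x > b))
def largeL (N b : Int) : List Int :=
  ((prefixT N).filter (fun x => decide (PySem.Int.mod N x = 0 ∧
      PySem.Int.floordiv N x ≠ x ∧ PySem.Int.floordiv N x > b))).map
    (fun x => PySem.Int.floordiv N x)

theorem mem_smallL {N b x : Int} :
    x ∈ smallL N b ↔ (1 ≤ x ∧ x * x ≤ N) ∧ PySem.Int.mod N x = 0 ∧ x > b := by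
  simp [smallL, List.mem_filter, mem_prefixT]

theorem mem_largeL {N b x : Int} :
    x ∈ largeL N b ↔ ∃ j, j ∈ prefixT N ∧ PySem.Int.mod N j = 0 ∧
      PySem.Int.floordiv N j ≠ j ∧ PySem.Int.floordiv N j > b ∧ x = PySem.Int.floordiv N j := by
  simp only [largeL, List.mem_map, List.mem_filter, decide_eq_true_eq]
  constructor
  · rintro ⟨j, ⟨hj, h1, h2, h3⟩, rfl⟩; exact ⟨j, hj, h1, h2, h3, rfl⟩
  · rintro ⟨j, hj, h1, h2, h3, rfl⟩; exact ⟨j, ⟨hj, h1, h2, h3⟩, rfl⟩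

-- membership in A's collected pair = being a divisor of N in [1,N] greater than b
theorem mem_collected (N b x : Int) :
    x ∈ smallL N b ++ largeL N b ↔ 1 ≤ x ∧ x ≤ N ∧ PySem.Int.mod N x = 0 ∧ x > b := by
  rw [List.mem_append, mem_smallL, mem_largeL]
  constructor
  · rintro (⟨⟨h1, h2⟩, hm, hb⟩ | ⟨j, hj, hm, hne, hbq, rfl⟩)
    · exact ⟨h1, by nlinarith, hm, hb⟩
    · obtain ⟨hj1, hj2⟩ := mem_prefixT_bounds hj
      obtain ⟨hN, hq1⟩ := cofactor_facts hj hm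
      refine ⟨hq1, by nlinarith, ?_, hbq⟩
      exact (PySem.Int.mod_eq_zero_iff_dvd N _).2 ⟨j, by linarith [hN, mul_comm j (PySem.Int.floordiv N j)]⟩
  · rintro ⟨h1, h2, hm, hb⟩
    by_cases hxx : x * x ≤ N
    · exact Or.inl ⟨⟨h1, hxx⟩, hm, hb⟩
    · obtain ⟨q, hq⟩ := (PySem.Int.mod_eq_zero_iff_dvd N x).1 hm
      have hq1 : 1 ≤ q := by nlinarith
      have hqx : q < x := by nlinarith
      have hqq : q * q ≤ N := by nlinarith
      have hjmem : q ∈ prefixT N := (mem_prefixT N q).2 ⟨hq1, hqq⟩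
      have hfd : PySem.Int.floordiv N q = x :=
        floordiv_cofactor (by omega) (by rw [hq]; ring)
      refine Or.inr ⟨q, hjmem, ?_, by rw [hfd]; omega, by rw [hfd]; omega, hfd.symm⟩
      exact (PySem.Int.mod_eq_zero_iff_dvd N q).2 ⟨x, by rw [hq]; ring⟩

theorem nodup_smallL (N b : Int) : (smallL N b).Nodup :=
  (((pairwise_prefixT N).filter _).imp ne_of_lt)

theorem pairwise_gt_largeL (N b : Int) : (largeL N b).Pairwise (· > ·) := by
  unfold largeL
  rw [List.pairwise_map]
  refine ((pairwise_prefixT N).filter _).imp_of_mem ?_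
  intro i j hi hj hij
  obtain ⟨hiT, hip⟩ := List.mem_filter.1 hi
  obtain ⟨hjT, hjp⟩ := List.mem_filter.1 hj
  simp only [decide_eq_true_eq] at hip hjp
  obtain ⟨hNi, hqi1⟩ := cofactor_facts hiT hip.1
  obtain ⟨hNj, hqj1⟩ := cofactor_facts hjT hjp.1
  obtain ⟨hi1, _⟩ := mem_prefixT_bounds hiT
  nlinarith

theorem nodup_collected (N b : Int) : (smallL N b ++ largeL N b).Nodup := by
  rw [List.nodup_append]
  refine ⟨nodup_smallL N b, (pairwise_gt_largeL N b).imp (fun h => (ne_of_gt h)), ?_⟩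
  intro x hx y hy
  rw [mem_smallL] at hx
  obtain ⟨j, hj, hm, hne, hbq, rfl⟩ := (mem_largeL).1 hy
  obtain ⟨hj1, hj2⟩ := mem_prefixT_bounds hj
  obtain ⟨hN, hq1⟩ := cofactor_facts hj hm
  have hlt : j < PySem.Int.floordiv N j :=
    lt_of_le_of_ne (by nlinarith) (Ne.symm hne)
  have : N < PySem.Int.floordiv N j * PySem.Int.floordiv N j := by nlinarith
  obtain ⟨⟨_, hx2⟩, _, _⟩ := hx
  intro hxy
  rw [hxy] at hx2
  omega

theorem collected_perm_canon (N b : Int) :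
    (smallL N b ++ largeL N b).Perm (canonDivs N b) := by
  rw [List.perm_ext_iff_of_nodup (nodup_collected N b)
      ((pairwise_canonDivs N b).imp ne_of_lt)]
  intro x
  rw [mem_collected, mem_canonDivs]

theorem calc_divisors_eq_canon (N b : Int) : calc_divisors N b = canonDivs N b := by
  unfold calc_divisors
  rw [calcDivLoopA_eq, List.nil_append]
  have hsplit : ((prefixT N).flatMap (contribA N b)).Perm (smallL N b ++ largeL N b) := by
    have hc : contribA N b = fun i => sPartA N b i ++ bPartA N b i := funext (contribA_eq N b)
    rw [hc]
    have := flatMap_append_perm (prefixT N) (sPartA N b) (bPartA N b)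
    rwa [flatMap_sPartA, flatMap_bPartA] at this
  apply PySem.List.sorted_eq_of_perm_of_pairwise_lt
  · exact ((collected_perm_canon N b).symm.trans hsplit.symm)
  · exact pairwise_canonDivs N b

-- ---------- B's side: the factorization loop produces exactly the divisors of N ----------

-- divs holds the distinct positive divisors of c
def DivsOf (c : Int) (divs : List Int) : Prop :=
  divs.Nodup ∧ ∀ x, x ∈ divs ↔ 1 ≤ x ∧ x ∣ c

-- loop invariant of factLoop: m is the unfactored part, p the next trial divisor
def LoopInv (N m p : Int) (divs : List Int) : Prop :=
  1 ≤ m ∧ m ∣ N ∧ (∀ q, 2 ≤ q → q < p → ¬ q ∣ m) ∧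
  (∀ q, 2 ≤ q → Prime q → q ∣ N / m → q < p) ∧ DivsOf (N / m) divs

theorem stripP_spec (p : Int) (hp : 2 ≤ p) :
    ∀ (n : Nat) (m e : Int), m.toNat ≤ n → 1 ≤ m →
      ∃ (m' : Int) (k : Nat), stripP n m p e = (m', e + k) ∧ m = m' * p ^ k ∧ 1 ≤ m' ∧
        ¬ p ∣ m' ∧ (¬ p ∣ m → k = 0) := by
  intro n
  induction n with
  | zero => intro m e hn hm; omega
  | succ n ih =>
    intro m e hn hm
    by_cases hdvd : PySem.Int.mod m p = 0
    · have hpd : p ∣ m := (PySem.Int.mod_eq_zero_iff_dvd m p).1 hdvd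
      have hfd : PySem.Int.floordiv m p = m / p := PySem.Int.floordiv_eq_ediv_of_pos (by omega)
      obtain ⟨t, ht⟩ := hpd
      have ht' : m / p = t := by rw [ht, Int.mul_ediv_cancel_left t (by omega)]
      have ht1 : 1 ≤ t := by nlinarith
      have htm : t < m := by nlinarith
      obtain ⟨m', k, hrec, heq, hm'1, hnp, _⟩ := ih t (e + 1) (by omega) ht1
      refine ⟨m', k + 1, ?_, ?_, hm'1, hnp, ?_⟩
      · show (if PySem.Int.mod m p = 0 ∧ 2 ≤ p ∧ 1 ≤ m
              then stripP n (PySem.Int.floordiv m p) p (e + 1) else (m, e)) = _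
        rw [if_pos ⟨hdvd, hp, hm⟩, hfd, ht', hrec]
        congr 1
        push_cast
        ring
      · rw [ht, heq]; ring
      · intro hc; exact absurd ⟨t, ht⟩ hc
    · have hnd : ¬ p ∣ m := fun hc => hdvd ((PySem.Int.mod_eq_zero_iff_dvd m p).2 hc)
      refine ⟨m, 0, ?_, by simp, hm, hnd, fun _ => rfl⟩
      show (if PySem.Int.mod m p = 0 ∧ 2 ≤ p ∧ 1 ≤ m
            then stripP n (PySem.Int.floordiv m p) p (e + 1) else (m, e)) = _
      rw [if_neg (by tauto)]
      simp

theorem int_prime_of_no_small (p : Int) (h2 : 2 ≤ p)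
    (h : ∀ q, 2 ≤ q → q < p → ¬ q ∣ p) : Prime p := by
  rw [Int.prime_iff_natAbs_prime]
  rw [Nat.prime_def_lt]
  have habs : (p.natAbs : Int) = p := Int.natAbs_of_nonneg (by omega)
  constructor
  · omega
  · intro q hq hdvd
    by_contra hq1
    have hq2 : 2 ≤ q := by
      rcases Nat.lt_or_ge q 2 with h' | h'
      · interval_cases q
        · exact absurd (Nat.eq_zero_of_zero_dvd hdvd) (by omega)
        · exact absurd rfl hq1
      · exact h'
    have hqi : (q : Int) ∣ p := by
      rw [← habs]
      exact_mod_cast hdvd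
    exact h q (by exact_mod_cast hq2) (by omega) hqi

theorem pow_cancel (p : Int) (hp : 2 ≤ p) :
    ∀ (k k' : Nat) (d d' : Int), 1 ≤ d → 1 ≤ d' → ¬ p ∣ d → ¬ p ∣ d' →
      d * p ^ k = d' * p ^ k' → d = d' ∧ k = k' := by
  intro k
  induction k with
  | zero =>
    intro k' d d' hd hd' hpd hpd' heq
    cases k' with
    | zero => simpa using heq
    | succ k' =>
      exfalso
      apply hpd
      refine ⟨d' * p ^ k', ?_⟩
      simpa [pow_succ] using heq.trans (by ring)
  | succ k ih =>
    intro k' d d' hd hd' hpd hpd' heq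
    cases k' with
    | zero =>
      exfalso
      apply hpd'
      refine ⟨d * p ^ k, ?_⟩
      simp only [pow_zero, mul_one] at heq
      rw [← heq]; ring
    | succ k' =>
      have hcancel : d * p ^ k = d' * p ^ k' := by
        have hp0 : p ≠ 0 := by omega
        have : (d * p ^ k) * p = (d' * p ^ k') * p := by
          rw [pow_succ] at heq
          rw [pow_succ] at heq
          linarith [heq]
        exact mul_right_cancel₀ hp0 this
      obtain ⟨h1, h2⟩ := ih k' d d' hd hd' hpd hpd' hcancel
      exact ⟨h1, by omega⟩

theorem mem_extDivs (divs : List Int) (p e x : Int) :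
    x ∈ extDivs divs p e ↔ ∃ d ∈ divs, ∃ k : Int, 0 ≤ k ∧ k < e + 1 ∧ x = d * p ^ k.toNat := by
  simp only [extDivs, List.mem_flatMap, List.mem_map, PySem.List.mem_pyRange_one]
  constructor
  · rintro ⟨d, hd, k, ⟨hk0, hk1⟩, rfl⟩; exact ⟨d, hd, k, hk0, hk1, rfl⟩
  · rintro ⟨d, hd, k, hk0, hk1, rfl⟩; exact ⟨d, hd, k, ⟨hk0, hk1⟩, rfl⟩

theorem extDivs_nodup (p e : Int) (hp2 : 2 ≤ p) :
    ∀ (divs : List Int), divs.Nodup → (∀ d ∈ divs, 1 ≤ d) → (∀ d ∈ divs, ¬ p ∣ d) →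
      (extDivs divs p e).Nodup := by
  intro divs
  induction divs with
  | nil => intro _ _ _; simp [extDivs]
  | cons d t ih =>
    intro hnd hpos hnp
    have hd1 : 1 ≤ d := hpos d List.mem_cons_self
    have hdp : ¬ p ∣ d := hnp d List.mem_cons_self
    have hblock : ((PySem.List.pyRange 0 (e + 1)).map (fun k => d * p ^ k.toNat)).Nodup := by
      apply List.Nodup.map_on
      · intro k hk k' hk' heq
        have hk0 := (PySem.List.mem_pyRange_one.1 hk).1
        have hk'0 := (PySem.List.mem_pyRange_one.1 hk').1
        have hpp : p ^ k.toNat = p ^ k'.toNat := mul_left_cancel₀ (by omega) heq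
        have : k.toNat = k'.toNat := by
          by_contra hne
          rcases Nat.lt_or_ge k.toNat k'.toNat with h | h
          · exact absurd hpp (ne_of_lt (Int.pow_lt_pow_of_lt (by omega) h))
          · have h' : k'.toNat < k.toNat := by omega
            exact absurd hpp.symm (ne_of_lt (Int.pow_lt_pow_of_lt (by omega) h'))
        omega
      · exact PySem.List.nodup_pyRange_one 0 (e + 1)
    have hrest : (extDivs t p e).Nodup :=
      ih (List.Nodup.of_cons hnd) (fun x hx => hpos x (List.mem_cons_of_mem d hx))
        (fun x hx => hnp x (List.mem_cons_of_mem d hx))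
    have hdisj : ∀ x, x ∈ (PySem.List.pyRange 0 (e + 1)).map (fun k => d * p ^ k.toNat) →
        x ∉ extDivs t p e := by
      intro x hx hx'
      obtain ⟨k, _, rfl⟩ := List.mem_map.1 hx
      obtain ⟨d', hd', k', hk'0, _, heq⟩ := (mem_extDivs t p e _).1 hx'
      have hd'1 : 1 ≤ d' := hpos d' (List.mem_cons_of_mem d hd')
      have hd'p : ¬ p ∣ d' := hnp d' (List.mem_cons_of_mem d hd')
      obtain ⟨hdd, _⟩ := pow_cancel p hp2 k.toNat k'.toNat d d' hd1 hd'1 hdp hd'p heq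
      rw [hdd] at hnd
      exact (List.nodup_cons.1 hnd).1 hd'
    have hsplit : extDivs (d :: t) p e
        = (PySem.List.pyRange 0 (e + 1)).map (fun k => d * p ^ k.toNat) ++ extDivs t p e := by
      simp [extDivs]
    rw [hsplit, List.nodup_append]
    refine ⟨hblock, hrest, ?_⟩
    intro x hx y hy hxy
    exact hdisj x hx (hxy ▸ hy)

theorem extDivs_spec (c p : Int) (e : Int) (hc : 1 ≤ c) (h2 : 2 ≤ p) (hp : Prime p)
    (hpc : ¬ p ∣ c) (he : 1 ≤ e) (divs : List Int) (hd : DivsOf c divs) :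
    DivsOf (c * p ^ e.toNat) (extDivs divs p e) := by
  obtain ⟨hnd, hmem⟩ := hd
  constructor
  · -- nodup
    apply extDivs_nodup p e h2
    · exact hnd
    · intro d hdm; exact ((hmem d).1 hdm).1
    · intro d hdm hpd
      exact hpc (dvd_trans hpd ((hmem d).1 hdm).2)
  · intro x
    rw [mem_extDivs]
    constructor
    · rintro ⟨d, hdm, k, hk0, hk1, rfl⟩
      obtain ⟨hd1, hdc⟩ := (hmem d).1 hdm
      have hppos : (0:Int) < p ^ k.toNat := pow_pos (by omega) _
      refine ⟨by nlinarith, ?_⟩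
      exact mul_dvd_mul hdc (pow_dvd_pow p (by omega))
    · rintro ⟨hx1, hxd⟩
      obtain ⟨d1, d2, hd1c, hd2p, hx⟩ := exists_dvd_and_dvd_of_dvd_mul hxd
      have hx0 : x ≠ 0 := by omega
      have hd10 : d1 ≠ 0 := by rintro rfl; simp at hx; omega
      have hd20 : d2 ≠ 0 := by rintro rfl; simp at hx; omega
      have habs : x = |d1| * |d2| := by
        rw [← abs_mul, ← hx]
        exact (abs_of_pos (by omega)).symm
      have hb1 : |d1| ∣ c := (abs_dvd _ _).2 hd1c
      have hb2 : |d2| ∣ p ^ e.toNat := (abs_dvd _ _).2 hd2p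
      obtain ⟨i, hi, hassoc⟩ := (dvd_prime_pow hp e.toNat).1 hb2
      have hpi : (0:Int) < p ^ i := pow_pos (by omega) _
      have hd2e : |d2| = p ^ i := by
        rcases Int.associated_iff.1 hassoc with h | h
        · exact h
        · exfalso
          have : |d2| ≥ 0 := abs_nonneg _
          omega
      refine ⟨|d1|, (hmem _).2 ⟨by have := abs_pos.2 hd10; omega, hb1⟩, (i : Int), by omega, ?_, ?_⟩
      · have : ((i : Int)) ≤ (e.toNat : Int) := by exact_mod_cast hi
        omega
      · rw [habs, hd2e]
        simp

theorem factLoop_spec (N : Int) (hN : 1 ≤ N) :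
    ∀ (n : Nat) (m p : Int) (divs : List Int), (m + 1 - p).toNat ≤ n → 2 ≤ p →
      LoopInv N m p divs →
      ∃ p', p ≤ p' ∧ (factLoop n m p divs).1 < p' * p' ∧
        LoopInv N (factLoop n m p divs).1 p' (factLoop n m p divs).2 := by
  intro n
  induction n with
  | zero =>
    intro m p divs hn hp inv
    have hm1 : 1 ≤ m := inv.1
    have hpm : m + 1 ≤ p := by omega
    rw [show factLoop 0 m p divs = (m, divs) from rfl]
    exact ⟨p, le_refl p, by nlinarith, inv⟩
  | succ n ih =>
    intro m p divs hn hp inv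
    obtain ⟨hm1, hmN, hI3, hI4, hdiv⟩ := inv
    by_cases hguard : p * p ≤ m ∧ 2 ≤ p ∧ 1 ≤ m
    · have hunf : factLoop (n + 1) m p divs
          = factLoop n (stripP m.toNat m p 0).1 (p + 1)
              (if (stripP m.toNat m p 0).2 ≠ 0
               then extDivs divs p (stripP m.toNat m p 0).2 else divs) := by
        show (if p * p ≤ m ∧ 2 ≤ p ∧ 1 ≤ m then _ else _) = _
        rw [if_pos hguard]
      rw [hunf]
      obtain ⟨hpp, _, _⟩ := hguard
      have hpm : p ≤ m := by nlinarith
      obtain ⟨m', k, hstrip, hmfac, hm'1, hpm', hk0⟩ :=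
        stripP_spec p hp m.toNat m 0 (le_refl _) hm1
      simp only [hstrip, zero_add]
      by_cases hk : k = 0
      · subst hk
        have hmm : m' = m := by simpa using hmfac.symm
        subst hmm
        have hnp : ¬ p ∣ m' := hpm'
        have hinv' : LoopInv N m' (p + 1) divs := by
          refine ⟨hm1, hmN, ?_, ?_, hdiv⟩
          · intro q hq1 hq2 hqd
            rcases lt_or_eq_of_le (by omega : q ≤ p) with h | h
            · exact hI3 q hq1 h hqd
            · exact hnp (h ▸ hqd)
          · intro q hq1 hq2 hqd
            exact lt_trans (hI4 q hq1 hq2 hqd) (by omega)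
        obtain ⟨p', hpp', hlt, hinv''⟩ := ih m' (p + 1) divs (by omega) (by omega) hinv'
        have hcast : ((0 : Nat) : Int) = 0 := rfl
        simp only [Nat.cast_zero, ne_eq, not_true_eq_false, if_false]
        refine ⟨p', by omega, ?_, ?_⟩
        · simpa using hlt
        · simpa using hinv''
      · -- k ≥ 1 : p divides m, p is prime; extend divs by powers of p
        have hk1 : 1 ≤ k := by omega
        have hpdm : p ∣ m := by
          refine ⟨m' * p ^ (k - 1), ?_⟩
          rw [hmfac]
          have : p ^ k = p * p ^ (k - 1) := by
            conv_lhs => rw [show k = 1 + (k - 1) by omega]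
            rw [pow_add, pow_one]
          rw [this]; ring
        have hprime : Prime p :=
          int_prime_of_no_small p hp (fun q hq1 hq2 hqd => hI3 q hq1 hq2 (dvd_trans hqd hpdm))
        obtain ⟨t, ht⟩ := hmN
        have htq : N / m = t := by rw [ht, Int.mul_ediv_cancel_left t (by omega)]
        have ht1 : 1 ≤ t := by nlinarith
        have hpt : ¬ p ∣ t := by
          intro hc
          exact absurd (hI4 p (by omega) hprime (htq ▸ hc)) (by omega)
        have hpk1 : (1 : Int) ≤ p ^ k := one_le_pow₀ (by omega)
        have hm'm : m' ∣ m := ⟨p ^ k, hmfac⟩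
        have hm'N : m' ∣ N := dvd_trans hm'm ⟨t, ht⟩
        have hc' : N / m' = t * p ^ k := by
          rw [ht, hmfac]
          rw [show m' * p ^ k * t = m' * (t * p ^ k) by ring]
          exact Int.mul_ediv_cancel_left _ (by omega)
        have hdiv' : DivsOf (t * p ^ k) (extDivs divs p (k : Int)) := by
          have := extDivs_spec t p (k : Int) ht1 hp hprime hpt (by exact_mod_cast hk1) divs
            (htq ▸ hdiv)
          simpa using this
        have hinv' : LoopInv N m' (p + 1) (extDivs divs p (k : Int)) := by
          refine ⟨hm'1, hm'N, ?_, ?_, hc' ▸ hdiv'⟩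
          · intro q hq1 hq2 hqd
            rcases lt_or_eq_of_le (by omega : q ≤ p) with h | h
            · exact hI3 q hq1 h (dvd_trans hqd hm'm)
            · exact hpm' (h ▸ hqd)
          · intro q hq1 hqp hqd
            rw [hc'] at hqd
            rcases (hqp.dvd_mul).1 hqd with h | h
            · exact lt_trans (hI4 q hq1 hqp (htq ▸ h)) (by omega)
            · have hqdp : q ∣ p := hqp.dvd_of_dvd_pow h
              have : q = p := by
                have hnp : Nat.Prime p.natAbs := Int.prime_iff_natAbs_prime.1 hprime
                have : q.natAbs ∣ p.natAbs := Int.natAbs_dvd_natAbs.2 hqdp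
                rcases (Nat.dvd_prime hnp).1 this with h1 | h1 <;> omega
              omega
        have hm'le : m' ≤ m := by nlinarith [hmfac]
        obtain ⟨p', hpp', hlt, hinv''⟩ :=
          ih m' (p + 1) (extDivs divs p (k : Int)) (by omega) (by omega) hinv'
        have hif : ((k : Int) ≠ 0) := by exact_mod_cast hk
        simp only [hif, if_true, ne_eq, not_false_eq_true]
        exact ⟨p', by omega, hlt, hinv''⟩
    · have hunf : factLoop (n + 1) m p divs = (m, divs) := by
        show (if p * p ≤ m ∧ 2 ≤ p ∧ 1 ≤ m then _ else _) = _
        rw [if_neg hguard]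
      rw [hunf]
      have hpp : m < p * p := by
        rcases not_and_or.1 hguard with h | h
        · omega
        · exact absurd (by constructor <;> omega) h
      exact ⟨p, le_refl p, hpp, ⟨hm1, hmN, hI3, hI4, hdiv⟩⟩

-- after the loop (and the final 'if m > 1' extension) divs is exactly the divisors of N
theorem final_divs (N : Int) (hN : 1 ≤ N) :
    DivsOf N (if 1 < (factLoop (N + 1).toNat N 2 [1]).1
              then extDivs (factLoop (N + 1).toNat N 2 [1]).2 (factLoop (N + 1).toNat N 2 [1]).1 1
              else (factLoop (N + 1).toNat N 2 [1]).2) := by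
  have hinv0 : LoopInv N N 2 [1] := by
    refine ⟨hN, dvd_refl N, ?_, ?_, ?_, ?_⟩
    · intro q hq1 hq2 _; omega
    · intro q hq1 hq2 hqd
      rw [Int.ediv_self (by omega)] at hqd
      have := Int.le_of_dvd (by omega) hqd; omega
    · simp
    · intro x
      rw [Int.ediv_self (by omega)]
      simp only [List.mem_singleton]
      constructor
      · rintro rfl; exact ⟨le_refl 1, dvd_refl 1⟩
      · rintro ⟨h1, h2⟩
        have := Int.le_of_dvd (by omega) h2; omega
  obtain ⟨p', hp2, hlt, hm'1, hm'N, hI3, hI4, hdivs⟩ :=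
    factLoop_spec N hN (N + 1).toNat N 2 [1] (by omega) (by omega) hinv0
  by_cases h1 : 1 < (factLoop (N + 1).toNat N 2 [1]).1
  · rw [if_pos h1]
    -- the leftover m' is prime
    set m' := (factLoop (N + 1).toNat N 2 [1]).1 with hm'def
    have hne : m'.natAbs ≠ 1 := by omega
    obtain ⟨q, hqp, hqd⟩ := Nat.exists_prime_and_dvd hne
    have hqdi : (q : Int) ∣ m' := by
      have h := Int.natCast_dvd_natCast.2 hqd
      rwa [Int.natAbs_of_nonneg (by omega : (0:Int) ≤ m')] at h
    have hq2 : (2 : Int) ≤ (q : Int) := by exact_mod_cast hqp.two_le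
    have hqge : p' ≤ (q : Int) := by
      by_contra hc
      exact hI3 q hq2 (by omega) hqdi
    obtain ⟨s, hs⟩ := hqdi
    have hs1 : 1 ≤ s := by nlinarith
    have hsone : s = 1 := by
      by_contra hsne
      have hs2 : 2 ≤ s := by omega
      have hne2 : s.natAbs ≠ 1 := by omega
      obtain ⟨r, hrp, hrd⟩ := Nat.exists_prime_and_dvd hne2
      have hrdi : (r : Int) ∣ s := by
        have h := Int.natCast_dvd_natCast.2 hrd
        rwa [Int.natAbs_of_nonneg (by omega : (0:Int) ≤ s)] at h
      have hr2 : (2 : Int) ≤ (r : Int) := by exact_mod_cast hrp.two_le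
      have hrm : (r : Int) ∣ m' := dvd_trans hrdi ⟨q, by rw [hs]; ring⟩
      have hrge : p' ≤ (r : Int) := by
        by_contra hc
        exact hI3 r hr2 (by omega) hrm
      have hsr : (r : Int) ≤ s := Int.le_of_dvd (by omega) hrdi
      nlinarith
    have hm'q : m' = (q : Int) := by rw [hs, hsone, mul_one]
    have hm'prime : Prime m' := by
      rw [Int.prime_iff_natAbs_prime, hm'q, Int.natAbs_natCast]
      exact hqp
    have hcm : N / m' * m' = N := Int.ediv_mul_cancel hm'N
    have hc1 : 1 ≤ N / m' := by nlinarith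
    have hm'c : ¬ m' ∣ N / m' := by
      intro hc
      have := hI4 m' (by omega) hm'prime hc
      omega
    have := extDivs_spec (N / m') m' 1 hc1 (by omega) hm'prime hm'c (le_refl 1)
      (factLoop (N + 1).toNat N 2 [1]).2 hdivs
    have h1t : ((1 : Int)).toNat = 1 := rfl
    rw [h1t, pow_one] at this
    rwa [hcm] at this
  · rw [if_neg h1]
    have hm'e : (factLoop (N + 1).toNat N 2 [1]).1 = 1 := by omega
    rw [hm'e, Int.ediv_one] at hdivs
    exact hdivs

theorem alt_eq_canon (N b : Int) : calc_divisors_alt N b = canonDivs N b := by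
  by_cases hN : N < 1
  · unfold calc_divisors_alt canonDivs
    rw [if_pos hN, PySem.List.pyRange_one_eq_nil (by omega)]
    rfl
  · unfold calc_divisors_alt
    rw [if_neg hN]
    obtain ⟨hnd, hmem⟩ := final_divs N (by omega)
    apply PySem.List.sorted_eq_of_perm_of_pairwise_lt
    · rw [List.perm_ext_iff_of_nodup ((pairwise_canonDivs N b).imp ne_of_lt) (hnd.filter _)]
      intro x
      rw [mem_canonDivs, List.mem_filter, hmem x]
      simp only [decide_eq_true_eq]
      constructor
      · rintro ⟨h1, h2, h3, h4⟩
        exact ⟨⟨h1, (PySem.Int.mod_eq_zero_iff_dvd N x).1 h3⟩, h4⟩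
      · rintro ⟨⟨h1, h2⟩, h3⟩
        exact ⟨h1, Int.le_of_dvd (by omega) h2, (PySem.Int.mod_eq_zero_iff_dvd N x).2 h2, h3⟩
    · exact pairwise_canonDivs N b

-- ===== VERDICT (by name: the statement is the Claim_ definition above) =====
theorem calc_divisors_spec : Claim_equal_calc_divisors := by
  intro N b _
  unfold Spec_calc_divisors
  rw [calc_divisors_eq_canon, alt_eq_canon]
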